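-- pv_equiv track=rewrite | github.com/SajinKowserSK/algorithms-practice | real/Earliest Time to Complete Deliveries.py | earliestTime
-- ===== SOURCE A (Python) =====
-- def earliestTime(numBuildings, buildingopenTime, offloadTime):
--     buildingopenTime.sort()
--     offloadTime.sort(reverse=True) # do this bc we want to match longest deliv times w earliest times to minimize length
--
--     earliest = None
--     start = 0
--
--     for x in range(0, len(offloadTime)):
--         curr_offload = offloadTime[x]
--
--         # this means after 4 packing 4 deliveries, move the "start" index to the next building
--         # since the last building's 4 docks are now full
--         if x != 0 and x % 4 == 0:
--             start += 1
--
--         # if earliest is none, update it to the current off load t ime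
--         if earliest is None:
--             earliest = buildingopenTime[start] + curr_offload
--
--         # otherwise, we know take the most of the current building time and current value of earliest
--         else:
--             curr_sum = buildingopenTime[start] + curr_offload
--             earliest = max(earliest, curr_sum)
--
--
--     return earliest
-- ===== SOURCE B (Python) =====
-- def earliestTime(numBuildings, buildingopenTime, offloadTime):
--     buildingopenTime.sort()
--     offloadTime.sort(reverse=True)
--     if not offloadTime:
--         return None
--     groups = (len(offloadTime) + 3) // 4
--     return max(buildingopenTime[b] + offloadTime[4 * b] for b in range(groups))
-- ===== Notes on version B (the rewrite author's own statement) =====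
-- stated objective: faster
-- what changed: Instead of scanning every offload with a running start index and an Optional accumulator, B iterates only over one building per group of four offloads (the group's largest offload, which dominates its group after the descending sort) and takes the max of those ~n/4 candidates.
import Mathlib
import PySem

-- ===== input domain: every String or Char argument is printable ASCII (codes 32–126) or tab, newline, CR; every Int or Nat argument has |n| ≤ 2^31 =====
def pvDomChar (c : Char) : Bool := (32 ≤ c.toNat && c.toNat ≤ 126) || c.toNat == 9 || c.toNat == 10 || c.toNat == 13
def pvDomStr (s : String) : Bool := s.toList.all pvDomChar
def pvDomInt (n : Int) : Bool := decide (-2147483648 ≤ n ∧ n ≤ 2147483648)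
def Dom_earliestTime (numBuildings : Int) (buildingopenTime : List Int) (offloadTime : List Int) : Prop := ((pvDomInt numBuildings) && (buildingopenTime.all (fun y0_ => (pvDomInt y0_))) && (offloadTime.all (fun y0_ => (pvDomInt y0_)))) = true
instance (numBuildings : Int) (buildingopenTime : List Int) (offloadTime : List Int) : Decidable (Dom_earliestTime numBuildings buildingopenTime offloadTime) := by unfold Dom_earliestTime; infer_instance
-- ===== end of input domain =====

-- B replaces A's per-offload scan (running `start` index + Optional accumulator) by a max over one
-- candidate per group of four offloads (each group's largest offload after the descending sort).
-- Both Pythons sort the two list arguments in place (identically in A and B); the equivalence proved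
-- here is about the RETURN value.

-- ===== PORT A =====
-- the body of A's for-loop, as a fold step over the state (earliest, start)
def pvStepA (bo off : List Int) (st : Option Int × Int) (x : Int) : Option Int × Int :=
  let curr := PySem.List.pyGetD off x 0        -- exact: x ∈ range(0, len(off))
  let start := if x ≠ 0 ∧ PySem.Int.mod x 4 = 0 then st.2 + 1 else st.2
  match st.1 with
  | none => (some (PySem.List.pyGetD bo start 0 + curr), start)   -- pyGetD exact under Pre_ (start in range)
  | some e => (some (max e (PySem.List.pyGetD bo start 0 + curr)), start)

def earliestTime (numBuildings : Int) (buildingopenTime : List Int) (offloadTime : List Int) : Option Int :=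
  let bo := PySem.List.sorted buildingopenTime (fun v => v) false
  let off := PySem.List.sorted offloadTime (fun v => v) true
  ((PySem.List.pyRange 0 (PySem.List.len off) 1).foldl (pvStepA bo off) (none, 0)).1

-- ===== PORT B =====
def earliestTime_alt (numBuildings : Int) (buildingopenTime : List Int) (offloadTime : List Int) : Option Int :=
  let bo := PySem.List.sorted buildingopenTime (fun v => v) false
  let off := PySem.List.sorted offloadTime (fun v => v) true
  if off = [] then none
  else
    let groups := PySem.Int.floordiv (PySem.List.len off + 3) 4
    PySem.List.max?
      ((PySem.List.pyRange 0 groups 1).map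
        (fun b => PySem.List.pyGetD bo b 0 + PySem.List.pyGetD off (4 * b) 0))   -- pyGetD exact under Pre_
      (fun v => v)

-- ===== PRECONDITION & SPEC =====
-- Pre_ excludes exactly the inputs on which A raises IndexError (more offloads than the buildings'
-- 4 docks each can absorb, so buildingopenTime[start] goes out of range); B raises IndexError there too.
def Pre_earliestTime (numBuildings : Int) (buildingopenTime : List Int) (offloadTime : List Int) : Prop :=
  offloadTime = [] ∨ (offloadTime.length + 3) / 4 ≤ buildingopenTime.length
instance (numBuildings : Int) (buildingopenTime : List Int) (offloadTime : List Int) : Decidable (Pre_earliestTime numBuildings buildingopenTime offloadTime) := by unfold Pre_earliestTime; infer_instance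

def pvWitness_earliestTime : Int × List Int × List Int := (2, [3, 1], [5, 2, 7, 1])

def Spec_earliestTime (numBuildings : Int) (buildingopenTime : List Int) (offloadTime : List Int) (out : Option Int) : Prop := out = earliestTime_alt numBuildings buildingopenTime offloadTime
instance (numBuildings : Int) (buildingopenTime : List Int) (offloadTime : List Int) (out : Option Int) : Decidable (Spec_earliestTime numBuildings buildingopenTime offloadTime out) := by unfold Spec_earliestTime; infer_instance

-- ===== CLAIM (what is proved, stated in full; the proofs are below) =====
def Claim_equal_earliestTime : Prop := ∀ (numBuildings : Int) (buildingopenTime : List Int) (offloadTime : List Int), Dom_earliestTime numBuildings buildingopenTime offloadTime → Pre_earliestTime numBuildings buildingopenTime offloadTime → Spec_earliestTime numBuildings buildingopenTime offloadTime (earliestTime numBuildings buildingopenTime offloadTime)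

-- ===== LEMMAS AND PROOFS =====

-- the candidate A builds at loop index x: building x//4 paired with offload x
def pvG (bo off : List Int) (x : Nat) : Int :=
  PySem.List.pyGetD bo ((x / 4 : Nat) : Int) 0 + PySem.List.pyGetD off (x : Int) 0

-- the candidate B builds for building/group b
def pvH (bo off : List Int) (b : Nat) : Int :=
  PySem.List.pyGetD bo ((b : Nat) : Int) 0 + PySem.List.pyGetD off ((4 * b : Nat) : Int) 0

theorem pvH_eq_pvG (bo off : List Int) (b : Nat) : pvH bo off b = pvG bo off (4 * b) := by
  simp [pvH, pvG, Nat.mul_div_cancel_left b (by omega : 0 < 4)]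

-- A's loop over range(0, n), n ≥ 1: earliest is the running max of pvG over [0, n), start is (n-1)/4
theorem pvLoopA (bo off : List Int) (n : Nat) (hn : 1 ≤ n) :
    (PySem.List.pyRange 0 (n : Int) 1).foldl (pvStepA bo off) (none, 0)
      = (some (((List.range n).map (pvG bo off)).foldl max (pvG bo off 0)),
         (((n - 1) / 4 : Nat) : Int)) := by
  induction n, hn using Nat.le_induction with
  | base =>
      rw [show ((1:Nat):Int) = 1 by norm_num,
        PySem.List.pyRange_one_cons (by norm_num), PySem.List.pyRange_one_eq_nil (by norm_num)]
      simp [pvStepA, pvG]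
  | succ n hn ih =>
      have hsplit : PySem.List.pyRange 0 ((n + 1 : Nat) : Int) 1
          = PySem.List.pyRange 0 (n : Int) 1 ++ [(n : Int)] := by
        push_cast
        exact PySem.List.pyRange_one_succ_right (by positivity)
      rw [hsplit, List.foldl_append, ih, List.range_succ, List.map_append, List.foldl_append]
      simp only [pvStepA, List.map_cons, List.map_nil, List.foldl_cons, List.foldl_nil]
      have hne : ((n : Int) ≠ 0) := by exact_mod_cast Nat.one_le_iff_ne_zero.mp hn
      have hmod : PySem.Int.mod (n : Int) 4 = ((n % 4 : Nat) : Int) := by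
        exact_mod_cast PySem.Int.mod_natCast n 4
      have hstart : (if (n : Int) ≠ 0 ∧ PySem.Int.mod (n : Int) 4 = 0
          then (((n - 1) / 4 : Nat) : Int) + 1 else (((n - 1) / 4 : Nat) : Int))
          = ((n / 4 : Nat) : Int) := by
        rw [hmod]
        split_ifs with h
        · have h4 : n % 4 = 0 := by exact_mod_cast h.2
          have : (n - 1) / 4 + 1 = n / 4 := by omega
          exact_mod_cast this
        · have h4 : ¬ (n % 4 = 0) := by
            intro hc; exact h ⟨hne, by exact_mod_cast hc⟩
          have : (n - 1) / 4 = n / 4 := by omega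
          exact_mod_cast this
      simp only [hstart]
      have hsub : (n + 1 - 1) / 4 = n / 4 := by omega
      rw [hsub]
      simp [pvG]

-- B's value when off is nonempty, as a fold of pvH over the group indices
theorem pvAltEq (bo off : List Int) (m : Nat)
    (h : ((off.length + 3) / 4 : Nat) = m + 1) :
    (PySem.List.max?
      ((PySem.List.pyRange 0 (PySem.Int.floordiv ((off.length : Int) + 3) 4) 1).map
        (fun b => PySem.List.pyGetD bo b 0 + PySem.List.pyGetD off (4 * b) 0))
      (fun v => v))
    = some (((List.range (m + 1)).map (pvH bo off)).foldl max (pvH bo off 0)) := by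
  have h1 : PySem.Int.floordiv ((off.length : Int) + 3) 4 = ((m + 1 : Nat) : Int) := by
    rw [show ((off.length : Int) + 3) = ((off.length + 3 : Nat) : Int) by push_cast; ring,
      show (4 : Int) = ((4 : Nat) : Int) by norm_num, PySem.Int.floordiv_natCast, h]
  rw [h1, PySem.List.pyRange_zero_nat, List.map_map]
  have h2 : ((fun b => PySem.List.pyGetD bo b 0 + PySem.List.pyGetD off (4 * b) 0) ∘ fun k : Nat => (k : Int))
      = pvH bo off := by
    funext k
    simp [pvH]
  rw [h2, List.range_succ_eq_map, List.map_cons, PySem.List.max?_id_cons, List.foldl_cons,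
    max_self]

-- with off sorted descending, each candidate of A is dominated by its group leader (B's candidate)
theorem pvG_le_pvH (bo off : List Int) (hsort : off.Pairwise (fun a b => b ≤ a))
    (x : Nat) (hx : x < off.length) : pvG bo off x ≤ pvH bo off (x / 4) := by
  have h4 : 4 * (x / 4) ≤ x := Nat.mul_div_le x 4
  have h4' : 4 * (x / 4) < off.length := lt_of_le_of_lt h4 hx
  simp only [pvG, pvH, PySem.List.pyGetD_natCast]
  have hoff : off.getD x 0 ≤ off.getD (4 * (x / 4)) 0 := by
    rw [List.getD_eq_getElem off 0 hx, List.getD_eq_getElem off 0 h4']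
    rcases Nat.lt_or_ge (4 * (x / 4)) x with h | h
    · exact (List.pairwise_iff_getElem.mp hsort) _ _ _ _ h
    · have : 4 * (x / 4) = x := le_antisymm h4 h
      simp [this]
  omega

-- the core: the max of A's candidates equals the max of B's group-leader candidates
theorem pvMaxEq (bo off : List Int) (hsort : off.Pairwise (fun a b => b ≤ a))
    (hn : 1 ≤ off.length) :
    ((List.range off.length).map (pvG bo off)).foldl max (pvG bo off 0)
      = ((List.range ((off.length + 3) / 4)).map (pvH bo off)).foldl max (pvH bo off 0) := by
  set n := off.length with hne
  set G := (n + 3) / 4 with hG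
  set L1 := (List.range n).map (pvG bo off) with hL1
  set L2 := (List.range G).map (pvH bo off) with hL2
  have hGpos : 1 ≤ G := by omega
  have hg_le : ∀ x < n, pvG bo off x ≤ L2.foldl max (pvH bo off 0) := by
    intro x hx
    have hb : x / 4 < G := by omega
    have hmem : pvH bo off (x / 4) ∈ L2 := List.mem_map_of_mem (List.mem_range.mpr hb)
    exact le_trans (pvG_le_pvH bo off hsort x hx)
      ((PySem.List.le_foldl_max L2 (pvH bo off 0)).2 _ hmem)
  have hh_le : ∀ b < G, pvH bo off b ≤ L1.foldl max (pvG bo off 0) := by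
    intro b hb
    have h4 : 4 * b < n := by omega
    have hmem : pvG bo off (4 * b) ∈ L1 := List.mem_map_of_mem (List.mem_range.mpr h4)
    rw [pvH_eq_pvG]
    exact (PySem.List.le_foldl_max L1 (pvG bo off 0)).2 _ hmem
  apply le_antisymm
  · rcases PySem.List.foldl_max_mem L1 (pvG bo off 0) with h | h
    · rw [h]; exact hg_le 0 (by omega)
    · rcases List.mem_map.mp (hL1 ▸ h) with ⟨x, hx, hxe⟩
      rw [← hxe]; exact hg_le x (List.mem_range.mp hx)
  · rcases PySem.List.foldl_max_mem L2 (pvH bo off 0) with h | h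
    · rw [h]; exact hh_le 0 (by omega)
    · rcases List.mem_map.mp (hL2 ▸ h) with ⟨b, hb, hbe⟩
      rw [← hbe]; exact hh_le b (List.mem_range.mp hb)

-- the two ports agree on every input (Pre_ only marks where the Pythons return at all)
theorem pvPortsAgree (numBuildings : Int) (bo off : List Int) :
    earliestTime numBuildings bo off = earliestTime_alt numBuildings bo off := by
  simp only [earliestTime, earliestTime_alt]
  set bo' := PySem.List.sorted bo (fun v => v) false with hbo'
  set off' := PySem.List.sorted off (fun v => v) true with hoff'
  by_cases hnil : off' = []
  · rw [hnil]
    simp [PySem.List.len, PySem.List.pyRange_one_eq_nil]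
  · have hn : 1 ≤ off'.length := List.length_pos_iff.mpr hnil
    have hlen : PySem.List.len off' = ((off'.length : Nat) : Int) := by
      simp [PySem.List.len_eq]
    rw [hlen, pvLoopA bo' off' off'.length hn, if_neg hnil]
    obtain ⟨m, hm⟩ : ∃ m, (off'.length + 3) / 4 = m + 1 :=
      ⟨(off'.length + 3) / 4 - 1, by omega⟩
    rw [pvAltEq bo' off' m hm]
    have hsort : off'.Pairwise (fun a b => b ≤ a) := by
      have := PySem.List.sorted_pairwise_rev off (fun v => v)
      simpa using this
    have := pvMaxEq bo' off' hsort hn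
    rw [hm] at this
    simp [this]

-- ===== VERDICT (by name: the statement is the Claim_ definition above) =====
theorem earliestTime_spec : Claim_equal_earliestTime := by
  intro numBuildings bo off _ _
  unfold Spec_earliestTime
  exact pvPortsAgree numBuildings bo off
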